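-- pv_equiv track=rewrite | github.com/JiminiiiKim/Programmers | Python/[프로그래머스] 2개 이하로 다른 비트.py | solution
-- ===== SOURCE A (Python) =====
-- def solution(numbers):
--     answer = []
--
--     for i in numbers :
--         if i % 2 == 0 : # 짝수
--             answer.append(i + 1)
--         else : # 홀수
--             num_bin = '0' + bin(i)[2:]
--             # 처음으로 '01'이 나온 지점을 '10'으로 바꿈.
--             num_bin = num_bin[:num_bin.rindex('0')] + '10' + num_bin[num_bin.rindex('0')+2:]
--             answer.append(int(num_bin, 2))
--
--     return answer
-- ===== SOURCE B (Python) =====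
-- # Same result without strings: recurse on the bits. For i % 4 != 3 (even, or odd
-- # with a single trailing 1-bit) the answer is i + 1; for i % 4 == 3 the trailing
-- # "11" is untouched pivot-wise, so recurse on i // 2 and re-append the low 1-bit.
-- def _next(i):
--     if i % 4 != 3:
--         return i + 1
--     return 2 * _next(i // 2) + 1
--
--
-- def solution(numbers):
--     return [_next(i) for i in numbers]
-- ===== Notes on version B (the rewrite author's own statement) =====
-- stated objective: simpler
-- what changed: The binary-string build / rindex scan / slice splice / int(...,2) reparse for odd values is replaced by direct recursion on the number itself: values with i % 4 != 3 map to i + 1, values with i % 4 == 3 reduce to the recursive result on i // 2.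
-- outside the precondition, e.g. on solution([-3]): A returns [11], B returns [-2]; on solution([-1]): A returns [5], B raises RecursionError
import Mathlib
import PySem

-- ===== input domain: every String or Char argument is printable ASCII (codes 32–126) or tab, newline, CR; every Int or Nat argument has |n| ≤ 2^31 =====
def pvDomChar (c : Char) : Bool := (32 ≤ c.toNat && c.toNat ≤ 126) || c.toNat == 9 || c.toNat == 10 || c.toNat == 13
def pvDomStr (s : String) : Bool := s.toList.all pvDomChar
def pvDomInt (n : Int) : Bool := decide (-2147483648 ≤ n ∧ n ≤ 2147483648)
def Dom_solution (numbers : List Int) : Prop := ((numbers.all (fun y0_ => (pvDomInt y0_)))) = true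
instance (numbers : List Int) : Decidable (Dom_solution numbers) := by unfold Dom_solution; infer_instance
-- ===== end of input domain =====

-- B replaces A's per-element binary-string build / rindex scan / slice splice / reparse
-- by a direct recursion on the integer (i % 4 != 3 -> i + 1, else recurse on i // 2): simpler.


-- ===== PORT A =====
-- num_bin.rindex('0'): index of the LAST '0' (Python raises ValueError if absent; here the
-- string always starts with '0', so the exception is unreachable; exact on such strings).
def pvRIndex0 : List Char → Nat
  | [] => 0
  | _ :: rest => if '0' ∈ rest then pvRIndex0 rest + 1 else 0

def pvBitsVal (s : List Char) : Int := s.foldl (fun a c => 2 * a + (if c = '1' then 1 else 0)) 0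

-- int(num_bin, 2): exact on the strings this program builds ('0'/'1' digits, possibly with a
-- leading '0b' prefix, which int(·, 2) accepts); ported by hand because the digit accumulator
-- inside PySem.Int.ofCharsBase? is private and opaque to proofs.
def pvParseBin2 (s : List Char) : Int :=
  match s with
  | c :: d :: rest => if c = '0' ∧ d = 'b' then pvBitsVal rest else pvBitsVal (c :: d :: rest)
  | s => pvBitsVal s

-- one iteration of A's loop body (the value appended for element i)
def pvFixA (i : Int) : Int :=
  if PySem.Int.mod i 2 = 0 then i + 1
  else
    -- num_bin = '0' + bin(i)[2:]
    let numBin := '0' :: PySem.List.slice (PySem.Int.toBinChars0b i) (some 2) none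
    let j := pvRIndex0 numBin
    -- num_bin[:j] + '10' + num_bin[j+2:]
    pvParseBin2 (PySem.List.slice numBin none (some (j : Int)) ++ ['1', '0'] ++
                 PySem.List.slice numBin (some ((j : Int) + 2)) none)

def solution (numbers : List Int) : List Int :=
  numbers.foldl (fun answer i => answer ++ [pvFixA i]) []

-- ===== PORT B =====
-- _next from Source B; the fuel argument only makes the recursion total (Source B has no such guard):
-- for the 0 ≤ i admitted by Pre_ the fuel i.natAbs + 1 is never exhausted.
def pvNext : Nat → Int → Int
  | 0, _ => 0
  | f + 1, i =>
    if PySem.Int.mod i 4 ≠ 3 then i + 1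
    else 2 * pvNext f (PySem.Int.floordiv i 2) + 1

def solution_alt (numbers : List Int) : List Int :=
  numbers.map (fun i => pvNext (i.natAbs + 1) i)

-- ===== PRECONDITION & SPEC =====
-- Pre_ excludes lists with a negative ODD element: those are outside the problem's natural
-- domain, and there A slices bin()'s '-0b' sign prefix into the digit string and returns
-- accidental values (B's recursion instead does not terminate on -1); negative evens stay inside.
def Pre_solution (numbers : List Int) : Prop := ∀ i ∈ numbers, PySem.Int.mod i 2 = 1 → 0 ≤ i
instance (numbers : List Int) : Decidable (Pre_solution numbers) := by unfold Pre_solution; infer_instance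
def pvWitness_solution : List Int := [0, 1, 2, 3, -4, 5, 7, 1022, 1023]

def Spec_solution (numbers : List Int) (out : List Int) : Prop := out = solution_alt numbers
instance (numbers : List Int) (out : List Int) : Decidable (Spec_solution numbers out) := by unfold Spec_solution; infer_instance

-- ===== CLAIM (what is proved, stated in full; the proofs are below) =====
def Claim_equal_solution : Prop := ∀ (numbers : List Int), Dom_solution numbers → Pre_solution numbers → Spec_solution numbers (solution numbers)

-- ===== LEMMAS AND PROOFS =====

-- proof-side recursive description of Nat.toDigits 2 (most-significant digit first)
def pvBinChars (n : Nat) : List Char :=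
  if n < 2 then [Nat.digitChar n]
  else pvBinChars (n / 2) ++ [Nat.digitChar (n % 2)]
  decreasing_by exact Nat.div_lt_self (by omega) (by omega)

lemma pvToDigitsCore_two (f : Nat) : ∀ (n : Nat) (acc : List Char), n < f →
    Nat.toDigitsCore 2 f n acc = pvBinChars n ++ acc := by
  induction f with
  | zero => intro n acc h; omega
  | succ f ih =>
    intro n acc h
    rw [Nat.toDigitsCore]
    by_cases h2 : n / 2 = 0
    · have : n < 2 := by omega
      rw [pvBinChars]
      simp [this, Nat.mod_eq_of_lt this, h2]
    · rw [if_neg h2]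
      have hrec := ih (n / 2) ((n % 2).digitChar :: acc) (by omega)
      rw [hrec]
      conv_rhs => rw [pvBinChars, if_neg (by omega)]
      simp

lemma pvToDigits_two (n : Nat) : Nat.toDigits 2 n = pvBinChars n := by
  have := pvToDigitsCore_two (n + 1) n [] (by omega)
  simpa [Nat.toDigits] using this

lemma pvBinChars_digits (n : Nat) : ∀ c ∈ pvBinChars n, c = '0' ∨ c = '1' := by
  induction n using Nat.strong_induction_on with
  | _ n ih =>
    intro c hc
    rw [pvBinChars] at hc
    by_cases h : n < 2
    · rw [if_pos h] at hc
      simp at hc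
      interval_cases n <;> simp [hc, Nat.digitChar]
    · rw [if_neg h] at hc
      simp at hc
      rcases hc with hc | hc
      · exact ih (n / 2) (Nat.div_lt_self (by omega) (by omega)) c hc
      · have h2 : n % 2 = 0 ∨ n % 2 = 1 := by omega
        rcases h2 with h2 | h2 <;> simp [hc, h2, Nat.digitChar]

lemma pvBinChars_even (n : Nat) (h : 1 ≤ n) : pvBinChars (2 * n) = pvBinChars n ++ ['0'] := by
  rw [pvBinChars, if_neg (by omega)]
  have : 2 * n / 2 = n := by omega
  have h2 : 2 * n % 2 = 0 := by omega
  simp [this, h2, Nat.digitChar]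

lemma pvBinChars_odd (n : Nat) (h : 1 ≤ n) : pvBinChars (2 * n + 1) = pvBinChars n ++ ['1'] := by
  rw [pvBinChars, if_neg (by omega)]
  have : (2 * n + 1) / 2 = n := by omega
  have h2 : (2 * n + 1) % 2 = 1 := by omega
  simp [this, h2, Nat.digitChar]

lemma pvBitsVal_append (x : List Char) (c : Char) :
    pvBitsVal (x ++ [c]) = 2 * pvBitsVal x + (if c = '1' then 1 else 0) := by
  simp [pvBitsVal, List.foldl_append]

lemma pvBitsVal_cons_zero (s : List Char) : pvBitsVal ('0' :: s) = pvBitsVal s := by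
  simp [pvBitsVal]

lemma pvBitsVal_binChars (n : Nat) : pvBitsVal (pvBinChars n) = (n : Int) := by
  induction n using Nat.strong_induction_on with
  | _ n ih =>
    rw [pvBinChars]
    by_cases h : n < 2
    · rw [if_pos h]
      interval_cases n <;> simp [pvBitsVal, Nat.digitChar]
    · rw [if_neg h, pvBitsVal_append, ih (n / 2) (Nat.div_lt_self (by omega) (by omega))]
      have h2 : n % 2 = 0 ∨ n % 2 = 1 := by omega
      rcases h2 with h2 | h2 <;> simp [h2, Nat.digitChar] <;> omega

lemma pvParseBin2_of_digits (s : List Char) (h : ∀ c ∈ s, c = '0' ∨ c = '1') :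
    pvParseBin2 s = pvBitsVal s := by
  match s with
  | [] => rfl
  | [c] => rfl
  | c :: d :: rest =>
    have hd := h d (by simp)
    have hdb : ¬ (c = '0' ∧ d = 'b') := by
      rintro ⟨-, hdb⟩
      rcases hd with hd | hd <;> simp [hdb] at hd
    rw [pvParseBin2, if_neg hdb]

lemma pvRIndex0_append_zero (y : List Char) (hy : '0' ∉ y) :
    ∀ x : List Char, pvRIndex0 (x ++ '0' :: y) = x.length := by
  intro x
  induction x with
  | nil => simp [pvRIndex0, hy]
  | cons c rest ih =>
    rw [List.cons_append, pvRIndex0]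
    have : '0' ∈ rest ++ '0' :: y := by simp
    rw [if_pos this, ih]
    simp

lemma pvRIndex0_append_of_not (s t : List Char) (hs : '0' ∈ s) (ht : '0' ∉ t) :
    pvRIndex0 (s ++ t) = pvRIndex0 s := by
  induction s with
  | nil => simp at hs
  | cons c rest ih =>
    rw [List.cons_append, pvRIndex0, pvRIndex0]
    by_cases h : '0' ∈ rest
    · rw [if_pos (by simp [h]), if_pos h, ih h]
    · have hc : c = '0' := by
        rcases List.mem_cons.mp hs with h1 | h1
        · exact h1.symm
        · exact absurd h1 h
      have : ¬ '0' ∈ rest ++ t := by simp [h, ht]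
      rw [if_neg this, if_neg h]

lemma pvRIndex0_lt_length (s : List Char) (hs : '0' ∈ s) : pvRIndex0 s < s.length := by
  induction s with
  | nil => simp at hs
  | cons c rest ih =>
    rw [pvRIndex0]
    by_cases h : '0' ∈ rest
    · have := ih h; simp [h]; omega
    · simp [h]

-- the value A's odd branch computes, as a function of the Nat m = i.toNat
def pvNumBin (m : Nat) : List Char := '0' :: pvBinChars m

def pvOddVal (m : Nat) : Int :=
  pvParseBin2 (List.take (pvRIndex0 (pvNumBin m)) (pvNumBin m) ++ ['1', '0'] ++
               List.drop (pvRIndex0 (pvNumBin m) + 2) (pvNumBin m))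

lemma pvNumBin_digits (m : Nat) : ∀ c ∈ pvNumBin m, c = '0' ∨ c = '1' := by
  intro c hc
  rcases List.mem_cons.mp hc with h | h
  · exact Or.inl h
  · exact pvBinChars_digits m c h

lemma pvNumBin_odd (q : Nat) (hq : q % 2 = 1) : pvNumBin (2 * q + 1) = pvNumBin q ++ ['1'] := by
  have h1 : 1 ≤ q := by omega
  simp [pvNumBin, pvBinChars_odd q h1]

lemma pvMod2 (m : Nat) : PySem.Int.mod (m : Int) 2 = ((m % 2 : Nat) : Int) := by
  exact_mod_cast PySem.Int.mod_natCast m 2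

lemma pvMod4 (m : Nat) : PySem.Int.mod (m : Int) 4 = ((m % 4 : Nat) : Int) := by
  exact_mod_cast PySem.Int.mod_natCast m 4

lemma pvFd2 (m : Nat) : PySem.Int.floordiv (m : Int) 2 = ((m / 2 : Nat) : Int) := by
  exact_mod_cast PySem.Int.floordiv_natCast m 2

-- A's odd branch (expressed over a Nat) unfolds to pvOddVal
lemma pvFixA_odd (m : Nat) (h : m % 2 = 1) : pvFixA (m : Int) = pvOddVal m := by
  have h1 : PySem.Int.mod (m : Int) 2 = 1 := by rw [pvMod2, h]; norm_num
  have hbin : PySem.Int.toBinChars0b (m : Int) = '0' :: 'b' :: Nat.toDigits 2 m := by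
    rw [PySem.Int.toBinChars0b, if_neg (by omega)]
    simp
  have hslice2 : PySem.List.slice ('0' :: 'b' :: Nat.toDigits 2 m) (some 2) none
      = Nat.toDigits 2 m := by
    have := PySem.List.slice_from_natCast ('0' :: 'b' :: Nat.toDigits 2 m) 2
    simpa using this
  simp only [pvFixA, h1]
  rw [if_neg (by norm_num)]
  rw [hbin, hslice2, pvToDigits_two]
  rw [PySem.List.slice_to_natCast]
  have hc : ((pvRIndex0 ('0' :: pvBinChars m) : Int) + 2)
      = ((pvRIndex0 ('0' :: pvBinChars m) + 2 : Nat) : Int) := by push_cast; ring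
  rw [hc, PySem.List.slice_from_natCast]
  rfl

-- main induction: A's odd-branch value equals B's recursion, for every odd m and enough fuel
lemma pvOddVal_eq_next (m : Nat) : m % 2 = 1 → ∀ f : Nat, m < f →
    pvOddVal m = pvNext f (m : Int) := by
  induction m using Nat.strong_induction_on with
  | _ m ih =>
    intro hodd f hf
    match f with
    | 0 => omega
    | f + 1 =>
      rw [pvNext, pvMod4 m]
      by_cases h4 : m % 4 = 3
      · -- m = 2q+1 with q odd: strip the low 1-bit and recurse
        rw [if_neg (by rw [h4]; norm_num)]
        obtain ⟨q, rfl⟩ : ∃ q, m = 2 * q + 1 := ⟨m / 2, by omega⟩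
        have hqodd : q % 2 = 1 := by omega
        -- shapes of the strings
        have hnum : pvNumBin (2 * q + 1) = pvNumBin q ++ ['1'] := pvNumBin_odd q hqodd
        have hmemq : '0' ∈ pvNumBin q := by simp [pvNumBin]
        have hj : pvRIndex0 (pvNumBin (2 * q + 1)) = pvRIndex0 (pvNumBin q) := by
          rw [hnum]; exact pvRIndex0_append_of_not _ _ hmemq (by simp)
        -- num_bin(q) itself ends in '1' (q odd), so the rindex is ≤ length - 2
        obtain ⟨z, hz⟩ : ∃ z, pvNumBin q = z ++ ['1'] := by
          rcases Nat.lt_or_ge q 2 with h2 | h2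
          · obtain rfl : q = 1 := by omega
            have hb1 : pvBinChars 1 = ['1'] := by rw [pvBinChars]; rfl
            exact ⟨['0'], by rw [pvNumBin, hb1]; rfl⟩
          · obtain ⟨t, rfl⟩ : ∃ t, q = 2 * t + 1 := ⟨q / 2, by omega⟩
            exact ⟨'0' :: pvBinChars t, by rw [pvNumBin, pvBinChars_odd t (by omega)]; rfl⟩
        have hzmem : '0' ∈ z := by
          rcases List.mem_append.mp (hz ▸ hmemq) with h | h
          · exact h
          · simp at h
        have hjlt : pvRIndex0 (pvNumBin q) + 2 ≤ (pvNumBin q).length := by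
          rw [hz, pvRIndex0_append_of_not z ['1'] hzmem (by simp)]
          have := pvRIndex0_lt_length z hzmem
          simp only [List.length_append, List.length_cons, List.length_nil]
          omega
        -- splice of num_bin(m) = splice of num_bin(q) with a '1' re-appended
        have hsplice :
            List.take (pvRIndex0 (pvNumBin (2 * q + 1))) (pvNumBin (2 * q + 1)) ++ ['1', '0'] ++
              List.drop (pvRIndex0 (pvNumBin (2 * q + 1)) + 2) (pvNumBin (2 * q + 1))
            = (List.take (pvRIndex0 (pvNumBin q)) (pvNumBin q) ++ ['1', '0'] ++
              List.drop (pvRIndex0 (pvNumBin q) + 2) (pvNumBin q)) ++ ['1'] := by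
          rw [hj, hnum, List.take_append_of_le_length (by omega),
              List.drop_append_of_le_length (by omega)]
          simp
        have hdig : ∀ c ∈ List.take (pvRIndex0 (pvNumBin q)) (pvNumBin q) ++ ['1', '0'] ++
            List.drop (pvRIndex0 (pvNumBin q) + 2) (pvNumBin q), c = '0' ∨ c = '1' := by
          intro c hc
          simp only [List.mem_append] at hc
          rcases hc with (hc | hc) | hc
          · exact pvNumBin_digits q c (List.mem_of_mem_take hc)
          · simp at hc; rcases hc with hc | hc <;> simp [hc]
          · exact pvNumBin_digits q c (List.mem_of_mem_drop hc)
        have hdigm : ∀ c ∈ List.take (pvRIndex0 (pvNumBin (2 * q + 1))) (pvNumBin (2 * q + 1)) ++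
            ['1', '0'] ++ List.drop (pvRIndex0 (pvNumBin (2 * q + 1)) + 2) (pvNumBin (2 * q + 1)),
            c = '0' ∨ c = '1' := by
          rw [hsplice]
          intro c hc
          rcases List.mem_append.mp hc with hc | hc
          · exact hdig c hc
          · simp at hc; simp [hc]
        -- compute both sides
        rw [pvOddVal, pvParseBin2_of_digits _ hdigm, hsplice, pvBitsVal_append]
        have hih := ih q (by omega) hqodd f (by omega)
        rw [pvOddVal, pvParseBin2_of_digits _ hdig] at hih
        have he : (2 * q + 1) / 2 = q := by omega
        have hfd : PySem.Int.floordiv ((2 * q + 1 : Nat) : Int) 2 = (q : Int) := by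
          rw [pvFd2, he]
        rw [hfd, ← hih]
        norm_num
      · -- m % 4 = 1: the splice is num_bin with its last two chars replaced by "10", value m + 1
        rw [if_pos (by omega)]
        rcases Nat.lt_or_ge m 2 with h2 | h2
        · obtain rfl : m = 1 := by omega
          have hb1 : pvBinChars 1 = ['1'] := by rw [pvBinChars]; rfl
          have : pvOddVal 1 = 2 := by rw [pvOddVal, pvNumBin, hb1]; rfl
          rw [this]
          norm_num
        · -- m = 4r + 1, r ≥ 1
          obtain ⟨r, rfl⟩ : ∃ r, m = 4 * r + 1 := ⟨m / 4, by omega⟩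
          have hr1 : 1 ≤ r := by omega
          have hnum : pvNumBin (4 * r + 1) = ('0' :: pvBinChars r) ++ ['0', '1'] := by
            rw [pvNumBin]
            have e1 : 4 * r + 1 = 2 * (2 * r) + 1 := by ring
            rw [e1, pvBinChars_odd (2 * r) (by omega), pvBinChars_even r hr1]
            simp
          have hj : pvRIndex0 (pvNumBin (4 * r + 1)) = ('0' :: pvBinChars r).length := by
            rw [hnum]
            exact pvRIndex0_append_zero ['1'] (by simp) ('0' :: pvBinChars r)
          have htake : List.take (pvRIndex0 (pvNumBin (4 * r + 1))) (pvNumBin (4 * r + 1))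
              = '0' :: pvBinChars r := by
            rw [hj, hnum, List.take_append_of_le_length (by omega), List.take_length]
          have hdrop : List.drop (pvRIndex0 (pvNumBin (4 * r + 1)) + 2) (pvNumBin (4 * r + 1))
              = [] := by
            apply List.drop_eq_nil_of_le
            rw [hj, hnum]
            simp
          rw [pvOddVal, htake, hdrop]
          have hdig : ∀ c ∈ ('0' :: pvBinChars r) ++ ['1', '0'] ++ ([] : List Char),
              c = '0' ∨ c = '1' := by
            intro c hc
            simp only [List.append_nil, List.mem_append] at hc
            rcases hc with hc | hc
            · rcases List.mem_cons.mp hc with h | h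
              · exact Or.inl h
              · exact pvBinChars_digits r c h
            · simp at hc; rcases hc with hc | hc <;> simp [hc]
          rw [pvParseBin2_of_digits _ hdig]
          simp only [List.append_nil]
          have e2 : ('0' :: pvBinChars r) ++ ['1', '0']
              = (('0' :: pvBinChars r) ++ ['1']) ++ ['0'] := by simp
          rw [e2, pvBitsVal_append, pvBitsVal_append, pvBitsVal_cons_zero, pvBitsVal_binChars]
          push_cast
          ring

-- even elements (any sign): both sides return i + 1
lemma pvFixA_even (i : Int) (f : Nat) (h : PySem.Int.mod i 2 = 0) :
    pvFixA i = pvNext (f + 1) i := by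
  rw [pvFixA, if_pos h, pvNext]
  have h2 : (2 : Int) ∣ i := (PySem.Int.mod_eq_zero_iff_dvd i 2).mp h
  have hne : PySem.Int.mod i 4 ≠ 3 := by
    intro hc
    have := PySem.Int.floordiv_mul_add_mod i 4
    rw [hc] at this
    omega
  rw [if_pos hne]

lemma pvMod2_cases (i : Int) : PySem.Int.mod i 2 = 0 ∨ PySem.Int.mod i 2 = 1 := by
  have h1 := PySem.Int.mod_nonneg i (b := 2) (by norm_num)
  have h2 := PySem.Int.mod_lt i (b := 2) (by norm_num)
  omega

lemma pvElem (i : Int) (hpre : PySem.Int.mod i 2 = 1 → 0 ≤ i) :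
    pvFixA i = pvNext (i.natAbs + 1) i := by
  rcases pvMod2_cases i with h | h
  · exact pvFixA_even i i.natAbs h
  · have hi : 0 ≤ i := hpre h
    obtain ⟨m, rfl⟩ : ∃ m : Nat, i = (m : Int) := ⟨i.toNat, by omega⟩
    have hodd : m % 2 = 1 := by
      rw [pvMod2] at h
      exact_mod_cast h
    rw [pvFixA_odd m hodd, Int.natAbs_natCast]
    exact pvOddVal_eq_next m hodd (m + 1) (by omega)

-- ===== VERDICT (by name: the statement is the Claim_ definition above) =====
theorem solution_spec : Claim_equal_solution := by
  intro numbers _hdom hpre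
  unfold Spec_solution solution solution_alt
  rw [PySem.List.foldl_append_singleton_eq_map]
  simp only [List.nil_append]
  apply List.map_congr_left
  intro i hi
  exact pvElem i (hpre i hi)
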